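-- pv_equiv track=rewrite | github.com/kylelong/weeklyProblems | hillsAndValleys.py | hills
-- ===== SOURCE A (Python) =====
-- def hills(nums):
--     if len(nums) < 3: return 0
--     left, right = nums[0], 0
--     hills = 0
--     for i in range(1, len(nums) - 1):
--         if nums[i] != nums[i - 1]:
--             left = nums[i - 1]
--         right = next((x for x in nums[i+1:] if x != nums[i]), None)
--         curr = nums[i]
--
--         if nums[i] != nums[i - 1]:
--             if right and curr > left and curr > right:
--                 hills += 1
--
--     return hills
-- ===== SOURCE B (Python) =====
-- def hills(nums):
--     count = 0
--     prev = None  # value of the run before the current one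
--     for cur, nxt in zip(nums, nums[1:]):
--         if nxt != cur:
--             if prev is not None and prev < cur > nxt:
--                 count += 1
--             prev = cur
--     return count
-- ===== Notes on version B (the rewrite author's own statement) =====
-- stated objective: faster
-- what changed: B replaces A's per-index rescan of the remaining list (a slice plus a linear search for the next different value at every position) with a single left-to-right pass that skips each run of equal values once and compares adjacent run values; B also drops A's 'if right and ...' truthiness test, which is stated as an intended difference.
-- intended difference: On inputs containing a strict rise p < c with c > 0 whose next different value is 0, A's 'if right and curr > left and curr > right' treats right == 0 as absent and silently skips the hill, returning a smaller count; B counts such hills, which is the intended behaviour of a hill counter (0 is a legitimate valley value). — e.g. on hills([1, 2, 0]): A returns 0, B returns 1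
import Mathlib
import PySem

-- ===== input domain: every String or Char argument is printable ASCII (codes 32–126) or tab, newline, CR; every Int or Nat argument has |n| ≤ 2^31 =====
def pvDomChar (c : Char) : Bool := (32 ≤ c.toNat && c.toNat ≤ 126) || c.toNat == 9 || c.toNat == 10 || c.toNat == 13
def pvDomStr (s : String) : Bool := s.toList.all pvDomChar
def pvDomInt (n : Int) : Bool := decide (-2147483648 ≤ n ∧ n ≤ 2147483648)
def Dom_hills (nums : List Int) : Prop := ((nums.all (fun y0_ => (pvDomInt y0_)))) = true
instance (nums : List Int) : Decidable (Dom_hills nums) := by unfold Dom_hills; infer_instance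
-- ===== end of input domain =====

-- B counts hills in one linear pass over adjacent pairs (A rescans the tail at every index);
-- B intentionally also counts hills whose next different value is 0, which A's truthiness test skips (see D_hills).


-- ===== PORT A =====
-- loop body of A's 'for i in range(1, len(nums) - 1)': state is (left, right, hills)
def hillsBody (nums : List Int) (st : Int × Option Int × Int) (i : Int) : Int × Option Int × Int :=
  let left := if PySem.List.pyGetD nums i 0 ≠ PySem.List.pyGetD nums (i - 1) 0
    then PySem.List.pyGetD nums (i - 1) 0 else st.1
  let right := (PySem.List.slice nums (some (i + 1)) none).find? (fun x => x != PySem.List.pyGetD nums i 0)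
  let curr := PySem.List.pyGetD nums i 0
  let cnt :=
    if PySem.List.pyGetD nums i 0 ≠ PySem.List.pyGetD nums (i - 1) 0 then
      -- 'if right and curr > left and curr > right': right must be non-None AND nonzero
      match right with
      | some r => if r ≠ 0 ∧ curr > left ∧ curr > r then st.2.2 + 1 else st.2.2
      | none => st.2.2
    else st.2.2
  (left, right, cnt)

def hills (nums : List Int) : Int :=
  if (nums.length : Int) < 3 then 0
  else
    let st := (PySem.List.pyRange 1 ((nums.length : Int) - 1) 1).foldl (hillsBody nums)
      (PySem.List.pyGetD nums 0 0, (some 0 : Option Int), (0 : Int))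
    st.2.2

-- ===== PORT B =====
-- loop body of B's 'for cur, nxt in zip(nums, nums[1:])': state is (count, prev)
def hillsAltBody (st : Int × Option Int) (p : Int × Int) : Int × Option Int :=
  if p.2 != p.1 then
    ((match st.2 with
      | some pv => if pv < p.1 ∧ p.1 > p.2 then st.1 + 1 else st.1
      | none => st.1), some p.1)
  else st

def hills_alt (nums : List Int) : Int :=
  ((nums.zip (PySem.List.slice nums (some 1) none)).foldl hillsAltBody (0, none)).1

-- ===== PRECONDITION & SPEC =====
-- On inputs containing a strict rise p < c with c > 0 whose next different value is 0, A's
-- 'if right and curr > left and curr > right' treats right == 0 as absent and silently skips the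
-- hill, returning a smaller count; B counts such hills, which is the intended behaviour of a
-- hill counter (0 is a legitimate valley value).
-- hasT scans a list of run values for a consecutive triple p, c, 0 with p < c and c > 0
def hasT : List Int → Bool
  | a :: b :: c :: t => (decide (a < b) && decide (0 < b) && decide (c = 0)) || hasT (b :: c :: t)
  | _ => false

def D_hills (nums : List Int) : Prop :=
  hasT (nums.destutter (· ≠ ·)) = true
instance (nums : List Int) : Decidable (D_hills nums) := by unfold D_hills; infer_instance

def Spec_hills (nums : List Int) (out : Int) : Prop := ¬ D_hills nums → out = hills_alt nums
instance (nums : List Int) (out : Int) : Decidable (Spec_hills nums out) := by unfold Spec_hills; infer_instance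

def pvDiffWitness_hills : List Int := [1, 2, 0]
def pvDiffWitnessOut_hills : Int × Int := (0, 1)

-- ===== CLAIM (what is proved, stated in full; the proofs are below) =====
def Claim_unchanged_hills : Prop := ∀ (nums : List Int), Dom_hills nums → Spec_hills nums (hills nums)
def Claim_changed_hills : Prop := Dom_hills (pvDiffWitness_hills) ∧ D_hills (pvDiffWitness_hills) ∧ hills (pvDiffWitness_hills) = pvDiffWitnessOut_hills.1 ∧ hills_alt (pvDiffWitness_hills) = pvDiffWitnessOut_hills.2 ∧ pvDiffWitnessOut_hills.1 ≠ pvDiffWitnessOut_hills.2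
def Claim_exact_hills : Prop := ∀ (nums : List Int), Dom_hills nums → D_hills nums → hills nums ≠ hills_alt nums

-- ===== LEMMAS AND PROOFS =====

-- structural characterisation of A's loop: contribution of position i given its predecessor value
def countA : Int → List Int → Int
  | _, [] => 0
  | prev, cur :: rest =>
    (match rest.find? (fun x => x != cur) with
     | some r => if cur ≠ prev ∧ r ≠ 0 ∧ cur > prev ∧ cur > r then 1 else 0
     | none => 0) + countA cur rest

-- number of hills A's truthiness test skips
def badCnt : Int → List Int → Int
  | _, [] => 0
  | prev, cur :: rest =>
    (if prev < cur ∧ 0 < cur ∧ rest.find? (fun x => x != cur) = some 0 then 1 else 0) + badCnt cur rest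

def badL (nums : List Int) : Int :=
  match nums with
  | [] => 0
  | x :: t => badCnt x t

-- structural characterisation of B's loop
def countC : Option Int → Int → List Int → Int
  | _, _, [] => 0
  | prev, cur, nxt :: t =>
    if nxt ≠ cur then
      (match prev with
       | some pv => if pv < cur ∧ cur > nxt then 1 else 0
       | none => 0) + countC (some cur) nxt t
    else countC prev cur t

theorem countA_small (prev : Int) (l : List Int) (h : l.length ≤ 1) : countA prev l = 0 := by
  match l with
  | [] => simp [countA]
  | [x] => simp [countA, List.find?]
  | x :: y :: t => simp at h

theorem loopA (nums : List Int) : ∀ (fuel k : Nat), k < nums.length →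
    nums.length - k ≤ fuel → ∀ (left : Int) (r0 : Option Int) (h0 : Int),
    ((PySem.List.pyRange ((k : Int) + 1) ((nums.length : Int) - 1) 1).foldl (hillsBody nums)
      (left, r0, h0)).2.2 = h0 + countA (nums.getD k 0) (nums.drop (k + 1)) := by
  intro fuel
  induction fuel with
  | zero => intro k hk hf; omega
  | succ fuel ih =>
    intro k hk hf left r0 h0
    by_cases hlt : ((k : Int) + 1) < ((nums.length : Int) - 1)
    · have hk1 : k + 1 < nums.length := by omega
      have hk2 : k + 2 < nums.length := by omega
      rw [PySem.List.pyRange_one_cons hlt, List.foldl_cons]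
      have e1 : PySem.List.pyGetD nums ((k : Int) + 1) 0 = nums.getD (k + 1) 0 := by
        have hc : ((k : Int) + 1) = ((k + 1 : Nat) : Int) := by push_cast; ring
        rw [hc, PySem.List.pyGetD_natCast]
      have e2 : PySem.List.pyGetD nums ((k : Int) + 1 - 1) 0 = nums.getD k 0 := by
        have hc : ((k : Int) + 1 - 1) = ((k : Nat) : Int) := by ring
        rw [hc, PySem.List.pyGetD_natCast]
      have e3 : PySem.List.slice nums (some ((k : Int) + 1 + 1)) none = nums.drop (k + 2) := by
        have hc : ((k : Int) + 1 + 1) = ((k + 2 : Nat) : Int) := by push_cast; ring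
        rw [hc, PySem.List.slice_from_natCast]
      have hcast : ((k : Int) + 1 + 1) = ((k + 1 : Nat) : Int) + 1 := by push_cast; ring
      rw [hcast]
      simp only [hillsBody, e1, e2, e3]
      rw [ih (k + 1) hk1 (by omega)]
      simp only [show k + 1 + 1 = k + 2 from rfl]
      have hdrop : nums.drop (k + 1) = nums.getD (k + 1) 0 :: nums.drop (k + 2) := by
        rw [List.getD_eq_getElem nums 0 hk1, List.getElem_cons_drop]
      rw [hdrop]
      simp only [countA]
      rcases hfind : (nums.drop (k + 2)).find? (fun x => x != nums.getD (k + 1) 0) with _ | r <;>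
        simp only [] <;> split_ifs <;> omega
    · rw [PySem.List.pyRange_one_eq_nil (by omega), List.foldl_nil]
      have h0eq : countA (nums.getD k 0) (nums.drop (k + 1)) = 0 :=
        countA_small _ _ (by simp only [List.length_drop]; omega)
      show h0 = h0 + countA (nums.getD k 0) (nums.drop (k + 1))
      omega

theorem hills_eq_countA (nums : List Int) :
    hills nums = match nums with | [] => 0 | x :: t => countA x t := by
  cases nums with
  | nil => simp [hills]
  | cons x t =>
    show hills (x :: t) = countA x t
    by_cases h3 : (((x :: t).length : Int)) < 3
    · unfold hills
      rw [if_pos h3]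
      exact (countA_small x t (by simp at h3 ⊢; omega)).symm
    · unfold hills
      rw [if_neg h3]
      have hl := loopA (x :: t) (x :: t).length 0 (by simp) (by omega)
        (PySem.List.pyGetD (x :: t) 0 0) (some 0) 0
      rw [show (((0 : Nat) : Int) + 1) = 1 by norm_num] at hl
      simpa using hl

theorem foldB_eq (t : List Int) : ∀ (cur : Int) (prev : Option Int) (count : Int),
    (((cur :: t).zip t).foldl hillsAltBody (count, prev)).1 = count + countC prev cur t := by
  induction t with
  | nil => intro cur prev count; simp [countC]
  | cons nxt t ih =>
    intro cur prev count
    rw [List.zip_cons_cons, List.foldl_cons]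
    by_cases h : nxt = cur
    · subst h
      have hb : hillsAltBody (count, prev) (nxt, nxt) = (count, prev) := by
        simp [hillsAltBody]
      rw [hb, ih]
      simp [countC]
    · have hb : hillsAltBody (count, prev) (cur, nxt) =
          ((match prev with
            | some pv => if pv < cur ∧ cur > nxt then count + 1 else count
            | none => count), some cur) := by
        simp [hillsAltBody, bne_iff_ne, h]
      rw [hb, ih]
      simp only [countC, if_pos h]
      cases prev with
      | none => simp
      | some pv => split <;> omega

theorem countA_cons_self (cur : Int) (t : List Int) : countA cur (cur :: t) = countA cur t := by
  simp only [countA]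
  split <;> simp_all

theorem find?_cons_self (cur : Int) (t : List Int) :
    (cur :: t).find? (fun x => x != cur) = t.find? (fun x => x != cur) := by
  rw [List.find?_cons_of_neg (by simp)]

theorem countC_some (t : List Int) : ∀ (p cur : Int), p ≠ cur →
    countC (some p) cur t = countA p (cur :: t) + badCnt p (cur :: t) := by
  induction t with
  | nil =>
    intro p cur hne
    simp [countC, countA, badCnt, List.find?]
  | cons nxt t ih =>
    intro p cur hne
    by_cases h : nxt = cur
    · subst h
      have hc : countC (some p) nxt (nxt :: t) = countC (some p) nxt t := by
        simp [countC]
      rw [hc, ih p nxt hne]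
      have ha : countA p (nxt :: nxt :: t) = countA p (nxt :: t) := by
        simp only [countA, find?_cons_self]
        rcases hf : List.find? (fun x => x != nxt) t with _ | r <;> simp_all
      have hb : badCnt p (nxt :: nxt :: t) = badCnt p (nxt :: t) := by
        simp only [badCnt, find?_cons_self]
        simp
      rw [ha, hb]
    · have hc : countC (some p) cur (nxt :: t) =
          (if p < cur ∧ cur > nxt then 1 else 0) + countC (some cur) nxt t := by
        simp [countC, h]
      rw [hc, ih cur nxt (fun he => h he.symm)]
      have hf : (nxt :: t).find? (fun x => x != cur) = some nxt := by
        rw [List.find?_cons_of_pos (by simp [h])]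
      have ha : countA p (cur :: nxt :: t) =
          (if cur ≠ p ∧ nxt ≠ 0 ∧ cur > p ∧ cur > nxt then 1 else 0) + countA cur (nxt :: t) := by
        simp only [countA, hf]
      have hb : badCnt p (cur :: nxt :: t) =
          (if p < cur ∧ 0 < cur ∧ nxt = 0 then 1 else 0) + badCnt cur (nxt :: t) := by
        simp only [badCnt, hf, Option.some.injEq]
      rw [ha, hb]
      split_ifs <;> omega

theorem countC_none (t : List Int) : ∀ (x : Int),
    countC none x t = countA x t + badCnt x t := by
  induction t with
  | nil => intro x; simp [countC, countA, badCnt]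
  | cons nxt t ih =>
    intro x
    by_cases h : nxt = x
    · subst h
      have hc : countC none nxt (nxt :: t) = countC none nxt t := by
        simp [countC]
      rw [hc, ih nxt, countA_cons_self]
      have : badCnt nxt (nxt :: t) = badCnt nxt t := by
        simp only [badCnt]
        rw [if_neg (by simp), zero_add]
      omega
    · have hc : countC none x (nxt :: t) = countC (some x) nxt t := by
        simp [countC, h]
      rw [hc, countC_some t x nxt (fun he => h he.symm)]

theorem alt_eq (nums : List Int) : hills_alt nums = hills nums + badL nums := by
  rw [hills_eq_countA]
  match nums with
  | [] => simp [hills_alt, badL]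
  | x :: t =>
    show hills_alt (x :: t) = countA x t + badL (x :: t)
    unfold hills_alt
    rw [PySem.List.slice_from_one]
    show (((x :: t).zip t).foldl hillsAltBody (0, none)).1 = countA x t + badL (x :: t)
    rw [foldB_eq, countC_none]
    simp [badL]

theorem badCnt_nonneg (l : List Int) : ∀ (prev : Int), 0 ≤ badCnt prev l := by
  induction l with
  | nil => intro prev; simp [badCnt]
  | cons cur t ih =>
    intro prev
    have := ih cur
    simp only [badCnt]
    split <;> omega

theorem destutter'_head (t : List Int) : ∀ c : Int, ∃ r, t.destutter' (· ≠ ·) c = c :: r := by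
  induction t with
  | nil => intro c; exact ⟨[], List.destutter'_nil _⟩
  | cons x t ih =>
    intro c
    rw [List.destutter'_cons]
    by_cases h : c ≠ x
    · rw [if_pos h]; exact ⟨_, rfl⟩
    · rw [if_neg h]; exact ih c

theorem destutter'_second (t : List Int) : ∀ c : Int,
    (t.destutter' (· ≠ ·) c).tail.head? = t.find? (fun x => x != c) := by
  induction t with
  | nil => intro c; simp [List.destutter'_nil]
  | cons x t ih =>
    intro c
    rw [List.destutter'_cons]
    by_cases h : c ≠ x
    · rw [if_pos h]
      obtain ⟨r, hr⟩ := destutter'_head t x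
      rw [List.find?_cons_of_pos (by simpa using Ne.symm h), hr]
      simp
    · rw [if_neg h]
      have hx : x = c := (not_ne_iff.mp h).symm
      subst hx
      rw [List.find?_cons_of_neg (by simp)]
      exact ih x

theorem badCnt_iff_hasT (t : List Int) : ∀ p : Int,
    0 < badCnt p t ↔ hasT (t.destutter' (· ≠ ·) p) = true := by
  induction t with
  | nil => intro p; simp [badCnt, List.destutter'_nil, hasT]
  | cons c t ih =>
    intro p
    rw [List.destutter'_cons]
    by_cases h : p ≠ c
    · rw [if_pos h]
      obtain ⟨r, hr⟩ := destutter'_head t c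
      have hsec := destutter'_second t c
      rw [hr] at hsec
      simp only [List.tail_cons] at hsec
      have hb : badCnt p (c :: t) =
          (if p < c ∧ 0 < c ∧ t.find? (fun x => x != c) = some 0 then 1 else 0) + badCnt c t := by
        simp only [badCnt]
      have hnn := badCnt_nonneg t c
      have ihc := ih c
      rw [hr] at ihc
      cases r with
      | nil =>
        have hf : t.find? (fun x => x != c) = none := by rw [← hsec]; rfl
        rw [hb, hf, hr]
        have h0 : ¬ 0 < badCnt c t := by
          rw [ihc, show hasT [c] = false from rfl]; simp
        rw [show hasT (p :: [c]) = false from rfl]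
        constructor
        · intro hcon
          rw [if_neg (by simp)] at hcon
          omega
        · intro hcon; simp at hcon
      | cons d r' =>
        have hf : t.find? (fun x => x != c) = some d := by rw [← hsec]; rfl
        rw [hb, hf, hr]
        simp only [hasT, Bool.or_eq_true, Bool.and_eq_true, decide_eq_true_eq]
        rw [← ihc]
        by_cases hcond : p < c ∧ 0 < c ∧ d = 0
        · rw [if_pos ⟨hcond.1, hcond.2.1, by simp [hcond.2.2]⟩]
          constructor
          · intro _; exact Or.inl (by tauto)
          · intro _; omega
        · rw [if_neg (by simpa [Option.some.injEq] using hcond)]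
          constructor
          · intro hlt; exact Or.inr (by omega)
          · intro hor
            rcases hor with hc | hc
            · exact absurd (by tauto) hcond
            · omega
    · rw [if_neg h]
      have hpc : p = c := not_ne_iff.mp h
      have hb : badCnt p (c :: t) = badCnt c t := by
        simp only [badCnt]
        rw [if_neg (by simp [hpc]), zero_add]
      rw [hb, hpc]
      exact ih c

theorem badL_iff_D (nums : List Int) : 0 < badL nums ↔ D_hills nums := by
  cases nums with
  | nil => simp [badL, D_hills, List.destutter_nil, hasT]
  | cons x t =>
    show 0 < badCnt x t ↔ _
    unfold D_hills
    rw [List.destutter_cons']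
    exact badCnt_iff_hasT t x

-- ===== VERDICT (by name: the statement is the Claim_ definition above) =====
theorem hills_spec : Claim_unchanged_hills := by
  intro nums _ hnD
  have h1 := alt_eq nums
  have h2 : ¬ 0 < badL nums := fun hp => hnD ((badL_iff_D nums).mp hp)
  have h3 : 0 ≤ badL nums := by
    cases nums with
    | nil => simp [badL]
    | cons x t => exact badCnt_nonneg t x
  omega

theorem hills_changed : Claim_changed_hills := by unfold Claim_changed_hills; decide

theorem hills_tight : Claim_exact_hills := by
  intro nums _ hD
  have h1 := alt_eq nums
  have h2 := (badL_iff_D nums).mpr hD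
  omega
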